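-- pv_equiv track=rewrite | github.com/ZZy979/LeetCode | Algorithms/815/numBusesToDestination.py | build_graph
-- ===== SOURCE A (Python) =====
-- from collections import defaultdict, deque
--
-- def build_graph(routes):
--     n = len(routes)
--     edge = [[False] * n for _ in range(n)]
--     station2bus = defaultdict(list)
--     for i in range(n):
--         for station in routes[i]:
--             for j in station2bus[station]:
--                 edge[i][j] = edge[j][i] = True
--             station2bus[station].append(i)
--     return edge, station2bus
-- ===== SOURCE B (Python) =====
-- from collections import defaultdict, deque
--
--
-- def build_graph(routes):
--     # Two separate passes: first index every station occurrence, then connect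
--     # every pair of buses appearing in the same station's occurrence list.
--     n = len(routes)
--     station2bus = defaultdict(list)
--     for i, route in enumerate(routes):
--         for station in route:
--             station2bus[station].append(i)
--     edge = [[False] * n for _ in range(n)]
--     for lst in station2bus.values():
--         rest = lst
--         while rest:
--             x = rest[0]
--             rest = rest[1:]
--             for y in rest:
--                 edge[x][y] = edge[y][x] = True
--     return edge, station2bus
-- ===== Notes on version B (the rewrite author's own statement) =====
-- stated objective: alternative
-- what changed: B separates index-building from edge-setting: it builds the full station-to-buses occurrence index in one pass and then, per station, connects every pair in that station's occurrence list, instead of A's interleaved scheme that connects each new occurrence to the previously indexed ones while building the index.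
import Mathlib
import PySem

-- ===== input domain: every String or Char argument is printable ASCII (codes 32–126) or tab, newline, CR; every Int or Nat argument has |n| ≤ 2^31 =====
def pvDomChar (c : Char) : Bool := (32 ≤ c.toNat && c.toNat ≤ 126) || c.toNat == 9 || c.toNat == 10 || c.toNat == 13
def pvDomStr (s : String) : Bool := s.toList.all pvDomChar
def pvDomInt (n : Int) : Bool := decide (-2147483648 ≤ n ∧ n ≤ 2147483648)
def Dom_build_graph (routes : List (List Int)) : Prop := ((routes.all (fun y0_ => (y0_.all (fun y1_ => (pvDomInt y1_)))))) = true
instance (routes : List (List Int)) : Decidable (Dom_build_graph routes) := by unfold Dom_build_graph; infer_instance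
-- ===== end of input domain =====

-- B builds the station→buses index completely first and only then connects, per station,
-- every pair of buses in its occurrence list (objective: alternative decomposition, same cost).


-- ===== PORT A =====
-- edge[i][j] = edge[j][i] = True; exact: both ports only ever index with the nonnegative
-- in-range bus indices they generated themselves (out-of-range modify/set are never reached).
def pvSet2 (e : List (List Bool)) (i j : Int) : List (List Bool) :=
  (e.modify i.toNat (fun r => r.set j.toNat true)).modify j.toNat (fun r => r.set i.toNat true)

def build_graph (routes : List (List Int)) : List (List Bool) × (List (Int × List Int)) :=
  let n := routes.length
  let edge := List.replicate n (List.replicate n false)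
  let st :=
    (PySem.List.pyRange 0 (PySem.List.len routes)).foldl
      (fun (st : List (List Bool) × PySem.Dict Int (List Int)) i =>
        (PySem.List.pyGetD routes i []).foldl
          (fun st station =>
            let cur := st.2.getD station []
            (cur.foldl (fun e j => pvSet2 e i j) st.1,
             st.2.insert station (cur ++ [i])))
          st)
      (edge, PySem.Dict.empty)
  (st.1, st.2.items)

-- ===== PORT B =====
-- the 'while rest: x = rest[0]; rest = rest[1:]; for y in rest: …' loop of Source B
def pvConnect (e : List (List Bool)) : List Int → List (List Bool)
  | [] => e
  | x :: rest => pvConnect (rest.foldl (fun e y => pvSet2 e x y) e) rest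

def build_graph_alt (routes : List (List Int)) : List (List Bool) × (List (Int × List Int)) :=
  let n := routes.length
  let d :=
    (PySem.List.enumerate routes).foldl
      (fun (d : PySem.Dict Int (List Int)) p =>
        p.2.foldl (fun d station => d.modify station [] (· ++ [p.1])) d)
      PySem.Dict.empty
  let edge := List.replicate n (List.replicate n false)
  let edge := d.values.foldl (fun e lst => pvConnect e lst) edge
  (edge, d.items)

-- ===== PRECONDITION & SPEC =====
def Spec_build_graph (routes : List (List Int)) (out : List (List Bool) × (List (Int × List Int))) : Prop := out = build_graph_alt routes
instance (routes : List (List Int)) (out : List (List Bool) × (List (Int × List Int))) : Decidable (Spec_build_graph routes out) := by unfold Spec_build_graph; infer_instance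

-- ===== CLAIM (what is proved, stated in full; the proofs are below) =====
def Claim_equal_build_graph : Prop := ∀ (routes : List (List Int)), Dom_build_graph routes → Spec_build_graph routes (build_graph routes)

-- ===== LEMMAS AND PROOFS =====

-- the flattened occurrence list [(bus, station), …] and abstract loop bodies
def pvOccs (routes : List (List Int)) : List (Int × Int) :=
  (PySem.List.enumerate routes).flatMap (fun p => p.2.map (fun s => (p.1, s)))

def pvDstep (d : PySem.Dict Int (List Int)) (q : Int × Int) : PySem.Dict Int (List Int) :=
  d.insert q.2 (d.getD q.2 [] ++ [q.1])

def pvAstep (st : List (List Bool) × PySem.Dict Int (List Int)) (q : Int × Int) :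
    List (List Bool) × PySem.Dict Int (List Int) :=
  ((st.2.getD q.2 []).foldl (fun e j => pvSet2 e q.1 j) st.1, pvDstep st.2 q)

def pvUpd (e : List (List Bool)) (q : Int × Int) : List (List Bool) := pvSet2 e q.1 q.2

-- pairs (earlier, later) inside one occurrence list
def pvPairsOf : List Int → List (Int × Int)
  | [] => []
  | x :: r => r.map (fun y => (x, y)) ++ pvPairsOf r

def pvAllPairs (d : PySem.Dict Int (List Int)) : List (Int × Int) := d.values.flatMap pvPairsOf

-- pairs A generates, in order, starting from dict d
def pvNewPairs (d : PySem.Dict Int (List Int)) : List (Int × Int) → List (Int × Int)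
  | [] => []
  | q :: rest => (d.getD q.2 []).map (fun j => (q.1, j)) ++ pvNewPairs (pvDstep d q) rest

lemma pvMod_comm (e : List (List Bool)) (i j k l : Nat) :
    (e.modify i (fun r => r.set j true)).modify k (fun r => r.set l true)
      = (e.modify k (fun r => r.set l true)).modify i (fun r => r.set j true) := by
  apply List.ext_getElem?
  intro m
  simp only [List.getElem?_modify]
  cases e[m]? with
  | none => rfl
  | some r =>
    simp only [Option.map_eq_map, Option.map_some]
    by_cases h1 : i = m <;> by_cases h2 : k = m <;> simp [h1, h2]
    by_cases h3 : j = l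
    · subst h3; simp
    · exact List.set_comm _ _ h3

lemma pvSet2_comm (e : List (List Bool)) (a b c d : Int) :
    pvSet2 (pvSet2 e a b) c d = pvSet2 (pvSet2 e c d) a b := by
  unfold pvSet2
  rw [pvMod_comm (e.modify a.toNat (fun r => r.set b.toNat true)) b.toNat a.toNat c.toNat d.toNat,
      pvMod_comm ((e.modify a.toNat (fun r => r.set b.toNat true)).modify c.toNat (fun r => r.set d.toNat true)) b.toNat a.toNat d.toNat c.toNat,
      pvMod_comm e a.toNat b.toNat c.toNat d.toNat,
      pvMod_comm (e.modify c.toNat (fun r => r.set d.toNat true)) a.toNat b.toNat d.toNat c.toNat]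

lemma pvSet2_swap (e : List (List Bool)) (a b : Int) : pvSet2 e a b = pvSet2 e b a := by
  unfold pvSet2
  rw [pvMod_comm e a.toNat b.toNat b.toNat a.toNat]

lemma pvUpd_rcomm : RightCommutative pvUpd := ⟨fun e q q' => pvSet2_comm e q.1 q.2 q'.1 q'.2⟩

lemma foldl_pvUpd_swap (ps : List (Int × Int)) (e : List (List Bool)) :
    (ps.map Prod.swap).foldl pvUpd e = ps.foldl pvUpd e := by
  induction ps generalizing e with
  | nil => rfl
  | cons q rest ih =>
    simp only [List.map_cons, List.foldl_cons]
    rw [show pvUpd e q.swap = pvUpd e q from pvSet2_swap e q.2 q.1]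
    exact ih _

-- A's fold is the occurrence fold
lemma build_graph_eq_occs (routes : List (List Int)) :
    build_graph routes =
      (((pvOccs routes).foldl pvAstep
          (List.replicate routes.length (List.replicate routes.length false), PySem.Dict.empty)).1,
       ((pvOccs routes).foldl pvAstep
          (List.replicate routes.length (List.replicate routes.length false), PySem.Dict.empty)).2.items) := by
  unfold build_graph pvOccs
  rw [List.foldl_flatMap, PySem.List.enumerate_eq_map_pyRange routes ([] : List Int), List.foldl_map]
  simp only [List.foldl_map]
  rfl

-- B's dict is the occurrence fold of pvDstep
lemma alt_dict_eq (routes : List (List Int)) :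
    ((PySem.List.enumerate routes).foldl
        (fun (d : PySem.Dict Int (List Int)) p =>
          p.2.foldl (fun d station => d.modify station [] (· ++ [p.1])) d)
        PySem.Dict.empty) = (pvOccs routes).foldl pvDstep PySem.Dict.empty := by
  unfold pvOccs
  rw [List.foldl_flatMap]
  simp only [List.foldl_map]
  rfl

-- the dict component of A's fold ignores the edge component
lemma foldl_pvAstep_snd (l : List (Int × Int)) (st : List (List Bool) × PySem.Dict Int (List Int)) :
    (l.foldl pvAstep st).2 = l.foldl pvDstep st.2 := by
  induction l generalizing st with
  | nil => rfl
  | cons q rest ih => simpa using ih (pvAstep st q)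

-- the edge component of A's fold applies exactly pvNewPairs
lemma foldl_pvAstep_fst (l : List (Int × Int)) (st : List (List Bool) × PySem.Dict Int (List Int)) :
    (l.foldl pvAstep st).1 = (pvNewPairs st.2 l).foldl pvUpd st.1 := by
  induction l generalizing st with
  | nil => rfl
  | cons q rest ih =>
    simp only [List.foldl_cons, pvNewPairs, List.foldl_append]
    rw [ih (pvAstep st q)]
    congr 1
    show (st.2.getD q.2 []).foldl (fun e j => pvSet2 e q.1 j) st.1 = _
    rw [List.foldl_map]
    rfl

lemma pvPairsOf_append_singleton (l : List Int) (i : Int) :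
    (pvPairsOf (l ++ [i])).Perm (pvPairsOf l ++ l.map (fun j => (j, i))) := by
  induction l with
  | nil => simp [pvPairsOf]
  | cons x r ih =>
    rw [List.perm_iff_count]
    intro p
    have h1 := List.perm_iff_count.mp ih p
    simp only [List.cons_append, pvPairsOf, List.map_append, List.map_cons, List.map_nil,
      List.count_append, List.count_cons, List.count_nil] at h1 ⊢
    omega

lemma pvAllPairs_Dstep (d : PySem.Dict Int (List Int)) (hn : d.keys.Nodup) (q : Int × Int) :
    (pvAllPairs (pvDstep d q)).Perm (pvAllPairs d ++ (d.getD q.2 []).map (fun j => (j, q.1))) := by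
  by_cases hc : d.contains q.2
  · have hs : (d.get? q.2).isSome = true := by
      have h := PySem.Dict.contains_eq_isSome_get? d q.2
      rw [hc] at h; exact h.symm
    obtain ⟨cur, hget⟩ := Option.isSome_iff_exists.mp hs
    have hgetD : d.getD q.2 [] = cur := PySem.Dict.getD_of_get?_eq_some d [] hget
    have hmem : (q.2, cur) ∈ d.items := PySem.Dict.mem_items_of_get?_eq_some d hget
    obtain ⟨L1, L2, hsplit⟩ := List.append_of_mem hmem
    have hkeys : d.keys = d.items.map (fun p => p.1) := rfl
    rw [hkeys, hsplit] at hn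
    simp only [List.map_append, List.map_cons, List.nodup_append, List.nodup_cons,
      List.mem_cons, List.mem_map] at hn
    have hL1 : ∀ p ∈ L1, (p.1 == q.2) = false := by
      intro p hp
      simp only [beq_eq_false_iff_ne]
      exact fun h => hn.2.2 p.1 ⟨p, hp, rfl⟩ q.2 (Or.inl rfl) h
    have hL2 : ∀ p ∈ L2, (p.1 == q.2) = false := by
      intro p hp
      simp only [beq_eq_false_iff_ne]
      exact fun h => hn.2.1.1 ⟨p, hp, h⟩
    have hit := PySem.Dict.items_insert_of_contains d (d.getD q.2 [] ++ [q.1]) hc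
    have hvals : (pvDstep d q).items =
        L1 ++ (q.2, cur ++ [q.1]) :: L2 := by
      rw [pvDstep, hit, hsplit, List.map_append, List.map_cons]
      congr 1
      · exact List.map_congr_left (fun p hp => by rw [hL1 p hp]; rfl) |>.trans (List.map_id _)
      · congr 1
        · simp [hgetD]
        · exact List.map_congr_left (fun p hp => by rw [hL2 p hp]; rfl) |>.trans (List.map_id _)
    rw [List.perm_iff_count]
    intro p
    have h2 := List.perm_iff_count.mp (pvPairsOf_append_singleton cur q.1) p
    have hAP : pvAllPairs (pvDstep d q) =
        (L1.map (fun p => p.2)).flatMap pvPairsOf ++ pvPairsOf (cur ++ [q.1])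
          ++ (L2.map (fun p => p.2)).flatMap pvPairsOf := by
      show ((pvDstep d q).items.map (fun p => p.2)).flatMap pvPairsOf = _
      rw [hvals]
      simp [List.flatMap_append]
    have hAP' : pvAllPairs d =
        (L1.map (fun p => p.2)).flatMap pvPairsOf ++ pvPairsOf cur
          ++ (L2.map (fun p => p.2)).flatMap pvPairsOf := by
      show (d.items.map (fun p => p.2)).flatMap pvPairsOf = _
      rw [hsplit]
      simp [List.flatMap_append]
    rw [hAP, hAP', hgetD]
    simp only [List.count_append] at h2 ⊢
    omega
  · rw [Bool.not_eq_true] at hc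
    have hgetD : d.getD q.2 [] = [] := PySem.Dict.getD_of_not_contains d [] hc
    have hit := PySem.Dict.items_insert_of_not_contains d (d.getD q.2 [] ++ [q.1]) hc
    have hthis : pvAllPairs (pvDstep d q) = pvAllPairs d ++ pvPairsOf (d.getD q.2 [] ++ [q.1]) := by
      show ((pvDstep d q).items.map (fun p => p.2)).flatMap pvPairsOf = _
      rw [pvDstep, hit]
      simp [List.flatMap_append]
      rfl
    rw [hthis, hgetD]
    simp [pvPairsOf]

lemma pvNewPairs_perm (l : List (Int × Int)) (d : PySem.Dict Int (List Int)) (hn : d.keys.Nodup) :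
    (pvAllPairs d ++ (pvNewPairs d l).map Prod.swap).Perm (pvAllPairs (l.foldl pvDstep d)) := by
  induction l generalizing d with
  | nil => simp [pvNewPairs]
  | cons q rest ih =>
    simp only [pvNewPairs, List.map_append, List.map_map, List.foldl_cons]
    have hsw : (d.getD q.2 []).map (Prod.swap ∘ fun j => (q.1, j))
        = (d.getD q.2 []).map (fun j => (j, q.1)) := rfl
    rw [hsw, ← List.append_assoc]
    exact ((pvAllPairs_Dstep d hn q).symm.append_right _).trans
      (ih (pvDstep d q) (PySem.Dict.nodup_keys_insert d q.2 _ hn))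

lemma pvConnect_eq_foldl (l : List Int) (e : List (List Bool)) :
    pvConnect e l = (pvPairsOf l).foldl pvUpd e := by
  induction l generalizing e with
  | nil => rfl
  | cons x r ih =>
    simp only [pvConnect, pvPairsOf, List.foldl_append]
    rw [ih]
    congr 1
    rw [List.foldl_map]
    rfl

lemma values_foldl_pvConnect (d : PySem.Dict Int (List Int)) (e : List (List Bool)) :
    d.values.foldl (fun e lst => pvConnect e lst) e = (pvAllPairs d).foldl pvUpd e := by
  unfold pvAllPairs
  rw [List.foldl_flatMap]
  apply PySem.List.foldl_congr_mem
  intro acc lst _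
  exact pvConnect_eq_foldl lst acc

-- ===== VERDICT (by name: the statement is the Claim_ definition above) =====
theorem build_graph_spec : Claim_equal_build_graph := by
  intro routes _
  show build_graph routes = build_graph_alt routes
  have halt : build_graph_alt routes =
      (((pvOccs routes).foldl pvDstep PySem.Dict.empty).values.foldl
          (fun e lst => pvConnect e lst)
          (List.replicate routes.length (List.replicate routes.length false)),
        ((pvOccs routes).foldl pvDstep PySem.Dict.empty).items) := by
    show (((PySem.List.enumerate routes).foldl
        (fun (d : PySem.Dict Int (List Int)) p =>
          p.2.foldl (fun d station => d.modify station [] (· ++ [p.1])) d)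
        PySem.Dict.empty).values.foldl (fun e lst => pvConnect e lst)
          (List.replicate routes.length (List.replicate routes.length false)),
       ((PySem.List.enumerate routes).foldl
        (fun (d : PySem.Dict Int (List Int)) p =>
          p.2.foldl (fun d station => d.modify station [] (· ++ [p.1])) d)
        PySem.Dict.empty).items) = _
    rw [alt_dict_eq]
  rw [build_graph_eq_occs, halt, foldl_pvAstep_snd, foldl_pvAstep_fst,
      values_foldl_pvConnect]
  have hperm := pvNewPairs_perm (pvOccs routes) PySem.Dict.empty PySem.Dict.nodup_keys_empty
  have hemp : pvAllPairs PySem.Dict.empty = [] := rfl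
  rw [hemp, List.nil_append] at hperm
  have hedge : (pvNewPairs PySem.Dict.empty (pvOccs routes)).foldl pvUpd
        (List.replicate routes.length (List.replicate routes.length false))
      = (pvAllPairs ((pvOccs routes).foldl pvDstep PySem.Dict.empty)).foldl pvUpd
        (List.replicate routes.length (List.replicate routes.length false)) := by
    rw [← foldl_pvUpd_swap]
    exact List.Perm.foldl_eq (rcomm := pvUpd_rcomm) hperm _
  rw [hedge]
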